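-- pv_equiv track=rewrite | github.com/rezaie99/lfp_processing | bifengephys/trajectory_process.py | get_transitions
-- ===== SOURCE A (Python) =====
-- def get_transitions(roi_at_each_frame):
--     transitions = []
--     prev = []
--     frame_trans = []
--
--     for i, n in enumerate(list(roi_at_each_frame)):
--         if i == 0 or n != list(roi_at_each_frame)[i - 1]:
--             transitions.append(n)
--             if i == 0:
--                 prev.append('nan')
--             else:
--                 prev.append(list(roi_at_each_frame)[i - 1])
--             frame_trans.append(i)
--     return prev, transitions, frame_trans
-- ===== SOURCE B (Python) =====
-- def get_transitions(roi_at_each_frame):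
--     xs = list(roi_at_each_frame)
--     if not xs:
--         return [], [], []
--     # stage 1: run-length encode the sequence
--     runs = []
--     i, n = 0, len(xs)
--     while i < n:
--         v = xs[i]
--         j = i + 1
--         while j < n and xs[j] == v:
--             j += 1
--         runs.append((v, j - i))
--         i = j
--     # stage 2: derive the three columns from the runs
--     values = [v for v, _ in runs]
--     prev = ['nan'] + values[:-1]
--     starts = []
--     acc = 0
--     for _, ln in runs:
--         starts.append(acc)
--         acc += ln
--     return prev, values, starts
-- ===== Notes on version B (the rewrite author's own statement) =====
-- stated objective: faster
-- what changed: A rebuilds list(roi_at_each_frame) inside every loop iteration (quadratic); B run-length encodes the sequence once and then derives the three output columns from the runs: transition values = run values, previous values = run values shifted by one ('nan' first), frame indices = prefix sums of run lengths.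
import Mathlib
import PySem

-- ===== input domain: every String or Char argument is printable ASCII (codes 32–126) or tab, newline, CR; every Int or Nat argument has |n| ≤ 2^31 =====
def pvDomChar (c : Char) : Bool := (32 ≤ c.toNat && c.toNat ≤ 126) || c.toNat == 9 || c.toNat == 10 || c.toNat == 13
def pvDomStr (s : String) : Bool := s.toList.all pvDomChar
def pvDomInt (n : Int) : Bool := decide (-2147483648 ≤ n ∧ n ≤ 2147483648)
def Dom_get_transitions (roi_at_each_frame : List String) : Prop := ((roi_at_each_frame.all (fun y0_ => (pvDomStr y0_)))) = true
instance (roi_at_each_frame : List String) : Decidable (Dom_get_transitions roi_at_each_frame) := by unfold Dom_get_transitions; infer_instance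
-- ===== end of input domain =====

-- B run-length encodes the sequence once and derives the three columns from the runs
-- (values, values shifted with 'nan', prefix sums of lengths), replacing A's per-iteration
-- list rebuild (objective: faster).

-- ===== PORT A =====
-- loop body of A: state is (transitions, prev, frame_trans) in append order
def pvStepA (xs : List String) (st : List String × List String × List Int) (p : Int × String) :
    List String × List String × List Int :=
  if p.1 = 0 ∨ p.2 ≠ (PySem.List.pyGet? xs (p.1 - 1)).getD "" then
    (st.1 ++ [p.2],
     st.2.1 ++ [if p.1 = 0 then "nan" else (PySem.List.pyGet? xs (p.1 - 1)).getD ""],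
     st.2.2 ++ [p.1])
  else st

def get_transitions (roi_at_each_frame : List String) : List String × List String × List Int :=
  let st := (PySem.List.enumerate roi_at_each_frame).foldl (pvStepA roi_at_each_frame) ([], [], [])
  (st.2.1, st.1, st.2.2)

-- ===== PORT B =====
-- Source B's outer while loop over runs, as the obvious structural recursion on the suffix;
-- the inner 'while j < n and xs[j] == v' counting loop is the length of the matching prefix
def pvRle : List String → List (String × Int)
  | [] => []
  | x :: rest =>
    let k := (rest.takeWhile (fun y => y == x)).length
    (x, (k : Int) + 1) :: pvRle (rest.drop k)
termination_by l => l.length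
decreasing_by simp

def get_transitions_alt (roi_at_each_frame : List String) : List String × List String × List Int :=
  match roi_at_each_frame with
  | [] => ([], [], [])
  | _ :: _ =>
    let runs := pvRle roi_at_each_frame
    let values := runs.map Prod.fst
    let prev := "nan" :: (PySem.List.slice values none (some (-1)))
    let starts := (runs.foldl (fun (st : List Int × Int) r => (st.1 ++ [st.2], st.2 + r.2)) ([], 0)).1
    (prev, values, starts)

-- ===== PRECONDITION & SPEC =====
def Spec_get_transitions (roi_at_each_frame : List String) (out : List String × List String × List Int) : Prop := out = get_transitions_alt roi_at_each_frame
instance (roi_at_each_frame : List String) (out : List String × List String × List Int) : Decidable (Spec_get_transitions roi_at_each_frame out) := by unfold Spec_get_transitions; infer_instance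

-- ===== CLAIM (what is proved, stated in full; the proofs are below) =====
def Claim_equal_get_transitions : Prop := ∀ (roi_at_each_frame : List String), Dom_get_transitions roi_at_each_frame → Spec_get_transitions roi_at_each_frame (get_transitions roi_at_each_frame)

-- ===== LEMMAS AND PROOFS =====

-- characterisation of A's loop on the tail: (prev, transitions, frame_trans)
-- contributed by the elements of l, the element before l being p at index i - 1
def pvCore (p : String) (i : Int) (l : List String) : List String × List String × List Int :=
  match l with
  | [] => ([], [], [])
  | x :: rest =>
    let r := pvCore x (i + 1) rest
    if x ≠ p then (p :: r.1, x :: r.2.1, i :: r.2.2) else r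

lemma pv_loopA (xs : List String) : ∀ (rest : List String) (j : Nat) (p : String),
    xs.drop j = p :: rest → ∀ (tr prev : List String) (fr : List Int),
    List.foldl (pvStepA xs) (tr, prev, fr) (PySem.List.enumerate rest ((j : Int) + 1)) =
      (tr ++ (pvCore p ((j : Int) + 1) rest).2.1, prev ++ (pvCore p ((j : Int) + 1) rest).1,
       fr ++ (pvCore p ((j : Int) + 1) rest).2.2) := by
  intro rest
  induction rest with
  | nil => intro j p h tr prev fr; simp [PySem.List.enumerate, pvCore]
  | cons x r ih =>
    intro j p h tr prev fr
    have hget : PySem.List.pyGet? xs ((j : Int)) = some p := by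
      have h0 : (xs.drop j)[0]? = xs[j + 0]? := List.getElem?_drop
      rw [h] at h0
      simp only [Nat.add_zero] at h0
      simp only [List.getElem?_cons_zero] at h0
      simpa [PySem.List.pyGet?_natCast] using h0.symm
    have hdrop : xs.drop (j + 1) = x :: r := by
      have : xs.drop (j + 1) = (xs.drop j).drop 1 := by
        rw [List.drop_drop]
      simp [this, h]
    have ihx := ih (j + 1) x hdrop
    simp only [PySem.List.enumerate_cons, List.foldl_cons]
    have hstep : pvStepA xs (tr, prev, fr) ((j : Int) + 1, x) =
        if x ≠ p then (tr ++ [x], prev ++ [p], fr ++ [(j : Int) + 1]) else (tr, prev, fr) := by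
      have hj : ¬ ((j : Int) + 1 = 0) := by omega
      simp only [pvStepA, hj, false_or]
      have : (j : Int) + 1 - 1 = (j : Int) := by ring
      rw [this, hget]
      by_cases hxp : x = p <;> simp [hxp]
    rw [hstep]
    have hcast : ((j : Int) + 1) + 1 = (((j + 1 : Nat) : Int) + 1) := by push_cast; ring
    by_cases hxp : x = p
    · subst hxp
      simp only [ne_eq, not_true_eq_false, if_false] at *
      rw [hcast, ihx]
      simp [pvCore]
    · rw [if_pos (by exact hxp)]
      rw [hcast, ihx]
      simp only [pvCore, if_pos (by exact hxp : x ≠ p)]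
      simp [List.append_assoc]

-- B-side proof helpers -------------------------------------------------------

lemma pvRle_nil : pvRle [] = [] := by rw [pvRle.eq_def]

lemma pvRle_cons (x : String) (rest : List String) :
    pvRle (x :: rest) =
      (x, ((rest.takeWhile (fun y => y == x)).length : Int) + 1) ::
        pvRle (rest.drop (rest.takeWhile (fun y => y == x)).length) := by
  rw [pvRle.eq_def]

-- the starts column of B, recursively
def pvStarts (a : Int) : List (String × Int) → List Int
  | [] => []
  | r :: rs => a :: pvStarts (a + r.2) rs

lemma pv_foldl_starts : ∀ (runs : List (String × Int)) (acc : List Int) (a : Int),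
    (runs.foldl (fun (st : List Int × Int) r => (st.1 ++ [st.2], st.2 + r.2)) (acc, a)).1 =
      acc ++ pvStarts a runs := by
  intro runs
  induction runs with
  | nil => intro acc a; simp [pvStarts]
  | cons r rs ih =>
    intro acc a
    simp only [List.foldl_cons, ih, pvStarts]
    simp

-- A's prev column is the transitions column shifted by one
lemma pvCore_prev : ∀ (l : List String) (p : String) (i : Int),
    (pvCore p i l).1 = (p :: (pvCore p i l).2.1).dropLast := by
  intro l
  induction l with
  | nil => intro p i; simp [pvCore]
  | cons x r ih =>
    intro p i
    by_cases hxp : x = p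
    · subst hxp
      simp only [pvCore, ne_eq, not_true_eq_false, if_false]
      exact ih x (i + 1)
    · simp only [pvCore, ne_eq, if_pos (show ¬ x = p from hxp)]
      cases hr : (pvCore x (i + 1) r).2.1 with
      | nil =>
        have := ih x (i + 1)
        rw [hr] at this
        simp [this]
      | cons z zs =>
        have := ih x (i + 1)
        rw [hr] at this
        simp only [List.dropLast_cons₂] at *
        simp [this]

-- pvCore ignores a prefix of elements equal to p, only advancing the index
lemma pvCore_skip : ∀ (t : List String) (x : String), (∀ y ∈ t, y = x) →
    ∀ (i : Int) (r : List String), pvCore x i (t ++ r) = pvCore x (i + t.length) r := by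
  intro t
  induction t with
  | nil => intro x _ i r; simp
  | cons y ts ih =>
    intro x h i r
    have hy : y = x := h y (by simp)
    subst hy
    simp only [List.cons_append, pvCore, ne_eq, not_true_eq_false, if_false]
    rw [ih y (fun z hz => h z (by simp [hz])) (i + 1) r]
    congr 1
    simp only [List.length_cons]
    push_cast
    ring

lemma pv_drop_takeWhile (l : List String) (p : String → Bool) :
    l.drop (l.takeWhile p).length = l.dropWhile p := by
  nth_rewrite 2 [← List.takeWhile_append_dropWhile (p := p) (l := l)]
  rw [List.drop_left]

-- main lemma: B's runs determine A's three columns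
lemma pv_main : ∀ (n : Nat) (xs : List String), xs.length ≤ n → ∀ (x : String) (i : Int),
    (pvRle (x :: xs)).map Prod.fst = x :: (pvCore x (i + 1) xs).2.1 ∧
    pvStarts i (pvRle (x :: xs)) = i :: (pvCore x (i + 1) xs).2.2 := by
  intro n
  induction n with
  | zero =>
    intro xs hxs x i
    have : xs = [] := List.eq_nil_of_length_eq_zero (Nat.le_zero.mp hxs)
    subst this
    rw [pvRle_cons]
    simp [pvRle_nil, pvCore, pvStarts]
  | succ n ih =>
    intro xs hxs x i
    rw [pvRle_cons]
    set k := (xs.takeWhile (fun y => y == x)).length with hk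
    have hdrop : xs.drop k = xs.dropWhile (fun y => y == x) := pv_drop_takeWhile xs _
    have hsplit : xs.takeWhile (fun y => y == x) ++ xs.dropWhile (fun y => y == x) = xs :=
      List.takeWhile_append_dropWhile
    have hskip : pvCore x (i + 1) xs = pvCore x (i + 1 + k) (xs.dropWhile (fun y => y == x)) := by
      rw [← hsplit]
      rw [pvCore_skip _ x (fun y hy => by simpa using List.mem_takeWhile_imp hy) (i + 1) _]
      rw [hsplit]
    cases hr : xs.dropWhile (fun y => y == x) with
    | nil =>
      rw [hdrop, hr]
      rw [hskip, hr]
      simp [pvRle_nil, pvCore, pvStarts]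
    | cons y r' =>
      have hyx : ¬ y = x := by
        have := List.head_dropWhile_not (fun y => y == x) (l := xs) (by simp [hr])
        simp only [hr, List.head_cons] at this
        simpa using this
      have hlen : r'.length ≤ n := by
        have h1 : (y :: r').length ≤ xs.length := by
          rw [← hr]
          exact List.length_dropWhile_le _ _
        simp only [List.length_cons] at h1
        omega
      have ihr := ih r' hlen y (i + (k + 1))
      rw [hdrop, hr]
      rw [hskip, hr]
      have hcore : pvCore x (i + 1 + (k : Int)) (y :: r') =
          (x :: (pvCore y (i + 1 + k + 1) r').1, y :: (pvCore y (i + 1 + k + 1) r').2.1,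
           (i + 1 + k) :: (pvCore y (i + 1 + k + 1) r').2.2) := by
        simp [pvCore, hyx]
      rw [hcore]
      have hidx : i + (k + 1) + 1 = i + 1 + (k : Int) + 1 := by ring
      rw [hidx] at ihr
      constructor
      · simp only [List.map_cons, ihr.1]
      · simp only [pvStarts, ihr.2]
        congr 2
        ring

-- ===== VERDICT (by name: the statement is the Claim_ definition above) =====
theorem get_transitions_spec : Claim_equal_get_transitions := by
  intro xs _
  unfold Spec_get_transitions
  cases xs with
  | nil => rfl
  | cons x rest =>
    show get_transitions (x :: rest) = get_transitions_alt (x :: rest)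
    have hA : get_transitions (x :: rest) =
        ("nan" :: (pvCore x 1 rest).1, x :: (pvCore x 1 rest).2.1, 0 :: (pvCore x 1 rest).2.2) := by
      unfold get_transitions
      rw [PySem.List.enumerate_cons]
      simp only [List.foldl_cons]
      have h0 : pvStepA (x :: rest) (([], [], []) : List String × List String × List Int) (0, x) =
          ([x], ["nan"], [(0 : Int)]) := by simp [pvStepA]
      rw [h0]
      have := pv_loopA (x :: rest) rest 0 x (by simp) [x] ["nan"] [0]
      simp only [Nat.cast_zero, zero_add] at this
      simp only [zero_add]
      rw [this]
      simp
    have hm := pv_main rest.length rest le_rfl x 0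
    simp only [zero_add] at hm
    have hB : get_transitions_alt (x :: rest) =
        ("nan" :: (pvCore x 1 rest).1, x :: (pvCore x 1 rest).2.1, 0 :: (pvCore x 1 rest).2.2) := by
      unfold get_transitions_alt
      simp only
      rw [pv_foldl_starts]
      rw [hm.1, hm.2]
      rw [PySem.List.slice_to_neg_one]
      rw [← pvCore_prev]
      simp
    rw [hA, hB]
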